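-- pv_equiv track=rewrite | github.com/rikiyanai/asciicker-xpedit | src/pipeline_v2/service.py | _build_native_l1_layer
-- ===== SOURCE A (Python) =====
-- NATIVE_CELL_H = 10  # rows per angle block (80 / 8)
--
-- def _digit_to_glyph(v: int) -> int:
--     if 0 <= v <= 9:
--         return 48 + v
--     if 10 <= v <= 35:
--         return 65 + (v - 10)
--     return 0
--
-- Cell = tuple[int, tuple[int, int, int], tuple[int, int, int]]
--
-- def _build_native_l1_layer(cols: int, rows: int) -> list[Cell]:
--     """Build layer 1: 9→0 countdown repeating every 10 rows.
--
--     Native XP contract: every cell on row r has glyph = digit(9 - (r % 10)),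
--     bg=(255,255,255), fg=(0,0,0). Fully populated.
--     """
--     ANIM_BG = (255, 255, 255)
--     ANIM_FG = (0, 0, 0)
--     layer: list[Cell] = []
--     for y in range(rows):
--         index_val = NATIVE_CELL_H - 1 - (y % NATIVE_CELL_H)
--         glyph = _digit_to_glyph(index_val)
--         cell: Cell = (glyph, ANIM_FG, ANIM_BG)
--         for _x in range(cols):
--             layer.append(cell)
--     return layer
-- ===== SOURCE B (Python) =====
-- NATIVE_CELL_H = 10  # rows per angle block (80 / 8)
--
--
-- def _digit_to_glyph(v: int) -> int:
--     if 0 <= v <= 9: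
--         return 48 + v
--     if 10 <= v <= 35:
--         return 65 + (v - 10)
--     return 0
--
--
-- def _build_native_l1_layer(cols: int, rows: int) -> list:
--     """Same grid, built from one 10-row period block replicated down the layer."""
--     ANIM_BG = (255, 255, 255)
--     ANIM_FG = (0, 0, 0)
--     if rows <= 0:
--         return []
--     block = []
--     for r in range(NATIVE_CELL_H):
--         block += [(_digit_to_glyph(NATIVE_CELL_H - 1 - r), ANIM_FG, ANIM_BG)] * cols
--     q, rem = divmod(rows, NATIVE_CELL_H)
--     return block * q + block[: rem * cols]
-- ===== Notes on version B (the rewrite author's own statement) =====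
-- stated objective: alternative
-- what changed: B exploits that the glyph depends only on y % 10: it builds a single 10-row period block (glyph computed once per period row, cells made by list repetition) and assembles the layer as block * (rows // 10) plus a slice block[:(rows % 10) * cols], instead of A's per-row glyph computation with cell-by-cell appends.
import Mathlib
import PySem

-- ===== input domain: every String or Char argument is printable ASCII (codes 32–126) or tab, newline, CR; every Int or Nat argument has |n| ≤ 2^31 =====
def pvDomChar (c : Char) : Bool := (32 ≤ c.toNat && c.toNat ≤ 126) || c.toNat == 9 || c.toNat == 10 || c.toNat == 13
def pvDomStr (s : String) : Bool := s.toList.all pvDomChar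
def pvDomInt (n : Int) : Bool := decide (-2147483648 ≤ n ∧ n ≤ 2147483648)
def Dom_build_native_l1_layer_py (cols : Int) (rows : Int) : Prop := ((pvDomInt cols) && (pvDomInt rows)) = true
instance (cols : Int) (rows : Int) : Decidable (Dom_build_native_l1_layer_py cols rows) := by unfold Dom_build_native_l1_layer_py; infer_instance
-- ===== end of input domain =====

-- B builds the 10-row period block once (glyph depends only on y % 10) and assembles the
-- layer by replicating the block plus a slice for the partial period, instead of A's
-- per-row glyph computation with cell-by-cell appends; alternative decomposition, same cost.


-- ===== PORT A =====
-- shared module helper _digit_to_glyph (identical in Source A and Source B)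
def digit_to_glyph_py (v : Int) : Int :=
  if 0 ≤ v ∧ v ≤ 9 then 48 + v
  else if 10 ≤ v ∧ v ≤ 35 then 65 + (v - 10)
  else 0

def build_native_l1_layer_py (cols : Int) (rows : Int) : List (Int × (Int × Int × Int) × (Int × Int × Int)) :=
  (PySem.List.pyRange 0 rows 1).foldl (fun layer y =>
    let index_val := 10 - 1 - PySem.Int.mod y 10
    let glyph := digit_to_glyph_py index_val
    let cell : Int × (Int × Int × Int) × (Int × Int × Int) := (glyph, (0, 0, 0), (255, 255, 255))
    (PySem.List.pyRange 0 cols 1).foldl (fun l _x => l ++ [cell]) layer) []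

-- ===== PORT B =====
-- the 10-row period block: block += [cell] * cols  (negative cols gives the empty list, as in Python)
def nativeL1Block (cols : Int) : List (Int × (Int × Int × Int) × (Int × Int × Int)) :=
  (PySem.List.pyRange 0 10 1).foldl (fun b r =>
    b ++ List.replicate cols.toNat
      ((digit_to_glyph_py (10 - 1 - r), (0, 0, 0), (255, 255, 255)) :
        Int × (Int × Int × Int) × (Int × Int × Int))) []

def build_native_l1_layer_py_alt (cols : Int) (rows : Int) : List (Int × (Int × Int × Int) × (Int × Int × Int)) :=
  if rows ≤ 0 then []
  else
    -- block * q + block[: rem * cols]  with q, rem = divmod(rows, 10)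
    (List.replicate (PySem.Int.floordiv rows 10).toNat (nativeL1Block cols)).flatten ++
      PySem.List.slice (nativeL1Block cols) none (some (PySem.Int.mod rows 10 * cols))

-- ===== PRECONDITION & SPEC =====
def Spec_build_native_l1_layer_py (cols : Int) (rows : Int) (out : List (Int × (Int × Int × Int) × (Int × Int × Int))) : Prop := out = build_native_l1_layer_py_alt cols rows
instance (cols : Int) (rows : Int) (out : List (Int × (Int × Int × Int) × (Int × Int × Int))) : Decidable (Spec_build_native_l1_layer_py cols rows out) := by unfold Spec_build_native_l1_layer_py; infer_instance

-- ===== CLAIM (what is proved, stated in full; the proofs are below) =====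
def Claim_equal_build_native_l1_layer_py : Prop := ∀ (cols : Int) (rows : Int), Dom_build_native_l1_layer_py cols rows → Spec_build_native_l1_layer_py cols rows (build_native_l1_layer_py cols rows)

-- ===== LEMMAS AND PROOFS =====

-- canonical form: row y (0-based) holds `c` copies of the cell for y % 10
def cellRow (k : Nat) : Int × (Int × Int × Int) × (Int × Int × Int) :=
  (48 + (9 - ((k % 10 : Nat) : Int)), (0, 0, 0), (255, 255, 255))

def specL (c r : Nat) : List (Int × (Int × Int × Int) × (Int × Int × Int)) :=
  (List.range r).flatMap (fun y => List.replicate c (cellRow y))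

theorem cellRow_add_ten (k : Nat) : cellRow (10 + k) = cellRow k := by
  simp [cellRow, Nat.add_mod_left]

theorem specL_add_ten (c m : Nat) : specL c (10 + m) = specL c 10 ++ specL c m := by
  unfold specL
  rw [List.range_add, List.flatMap_append, List.flatMap_map]
  simp [cellRow_add_ten]

theorem length_specL (c r : Nat) : (specL c r).length = r * c := by
  induction r with
  | zero => simp [specL]
  | succ n ih =>
    unfold specL at *
    rw [List.range_succ, List.flatMap_append, List.length_append, ih]
    simp [Nat.succ_mul]

theorem specL_take (c rem : Nat) (h : rem ≤ 10) :
    (specL c 10).take (rem * c) = specL c rem := by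
  have h10 : (10 : Nat) = rem + (10 - rem) := by omega
  have : specL c 10 = specL c rem ++ ((List.range (10 - rem)).map (rem + ·)).flatMap
      (fun y => List.replicate c (cellRow y)) := by
    rw [h10]; unfold specL
    rw [List.range_add, List.flatMap_append, Nat.add_sub_cancel_left]
  rw [this, List.take_append_of_le_length (by rw [length_specL]), List.take_of_length_le (by rw [length_specL])]

theorem specL_decompose (c q rem : Nat) (h : rem ≤ 10) :
    specL c (10 * q + rem) = (List.replicate q (specL c 10)).flatten ++ (specL c 10).take (rem * c) := by
  induction q with
  | zero => simp [specL_take c rem h]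
  | succ n ih =>
    have : 10 * (n + 1) + rem = 10 + (10 * n + rem) := by ring
    rw [this, specL_add_ten, ih, List.replicate_succ, List.flatten_cons, List.append_assoc]

theorem digit_glyph_mod (m : Int) (h0 : 0 ≤ m) (h9 : m ≤ 9) :
    digit_to_glyph_py (10 - 1 - m) = 48 + (9 - m) := by
  unfold digit_to_glyph_py
  rw [if_pos (by omega)]
  ring_nf

theorem portA_eq_specL (cols rows : Int) :
    build_native_l1_layer_py cols rows = specL cols.toNat rows.toNat := by
  unfold build_native_l1_layer_py
  have hinner : ∀ (acc : List (Int × (Int × Int × Int) × (Int × Int × Int)))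
      (cell : Int × (Int × Int × Int) × (Int × Int × Int)),
      (PySem.List.pyRange 0 cols 1).foldl (fun l _x => l ++ [cell]) acc
        = acc ++ List.replicate cols.toNat cell := by
    intro acc cell
    rw [PySem.List.foldl_append_singleton_eq_map, List.map_const', PySem.List.length_pyRange_one]
    norm_num
  simp only [hinner]
  rw [PySem.List.foldl_append_eq_flatMap, List.nil_append, PySem.List.pyRange_one]
  have hr : ((rows : Int) - 0).toNat = rows.toNat := by norm_num
  rw [hr, List.flatMap_map]
  unfold specL
  congr 1
  funext k
  congr 1
  have hmod : PySem.Int.mod ((0 : Int) + (k : Int)) 10 = ((k % 10 : Nat) : Int) := by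
    rw [Int.zero_add]
    exact_mod_cast PySem.Int.mod_natCast k 10
  have hk9 : ((k % 10 : Nat) : Int) ≤ 9 := by
    have := Nat.mod_lt k (show 0 < 10 by omega); omega
  simp only [hmod, digit_glyph_mod _ (by positivity) hk9, cellRow]

theorem block_eq_specL10 (cols : Int) :
    nativeL1Block cols = specL cols.toNat 10 := by
  unfold nativeL1Block
  rw [PySem.List.foldl_append_eq_flatMap, List.nil_append, PySem.List.pyRange_one]
  unfold specL
  norm_num
  simp [List.range_succ, cellRow, digit_to_glyph_py]

theorem portB_eq_specL (cols rows : Int) :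
    build_native_l1_layer_py_alt cols rows = specL cols.toNat rows.toNat := by
  unfold build_native_l1_layer_py_alt
  split_ifs with h
  · have h0 : rows.toNat = 0 := by omega
    simp [h0, specL]
  · have hpos : 0 < rows := by omega
    rw [block_eq_specL10]
    have hq : (PySem.Int.floordiv rows 10).toNat = rows.toNat / 10 := by
      rw [PySem.Int.floordiv_eq_ediv_of_pos (by omega)]
      omega
    have hrem : PySem.Int.mod rows 10 = ((rows.toNat % 10 : Nat) : Int) := by
      rw [PySem.Int.mod_eq_emod_of_pos (by omega)]
      omega
    rw [hq, hrem]
    by_cases hc : 0 ≤ cols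
    · have hcast : ((rows.toNat % 10 : Nat) : Int) * cols
          = (((rows.toNat % 10) * cols.toNat : Nat) : Int) := by
        rcases Int.eq_ofNat_of_zero_le hc with ⟨n, rfl⟩
        push_cast
        simp
      rw [hcast, PySem.List.slice_to_natCast,
        ← specL_decompose cols.toNat (rows.toNat / 10) (rows.toNat % 10)
          (le_of_lt (Nat.mod_lt _ (by omega)))]
      congr 1
      exact Nat.div_add_mod rows.toNat 10
    · have hc0 : cols.toNat = 0 := by omega
      simp [hc0, specL, PySem.List.slice]
      simp [List.flatMap]

-- ===== VERDICT (by name: the statement is the Claim_ definition above) =====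
theorem build_native_l1_layer_py_spec : Claim_equal_build_native_l1_layer_py := by
  intro cols rows _
  unfold Spec_build_native_l1_layer_py
  rw [portA_eq_specL, portB_eq_specL]
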